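-- pv_equiv track=rewrite | github.com/hosseinamin/shacct | lib/shacct/modules/__init__.py | read_args_opt
-- ===== SOURCE A (Python) =====
-- def read_args_opt(args):
--   i = 0
--   l = len(args)
--   ret = {}
--   while i < l:
--     arg = args[i]
--     if arg.index("--") != 0:
--       raise AssertionError("Argument option is expected but %s given" % arg)
--     try:
--       ret[arg[2:]] = args[i + 1]
--     except IndexError:
--       ret[arg[2:]] = True
--     i += 2
--   return ret
-- ===== SOURCE B (Python) =====
-- def read_args_opt(args):
--   keys = args[::2]
--   vals = args[1::2]
--   for key in keys:
--     if key.index("--") != 0: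
--       raise AssertionError("Argument option is expected but %s given" % key)
--   vals += [True] * (len(keys) - len(vals))
--   return dict(zip([key[2:] for key in keys], vals))
-- ===== Notes on version B (the rewrite author's own statement) =====
-- stated objective: idiomatic
-- what changed: replaces A's single index-stepping validate-and-assign while loop (with try/except IndexError) by three staged passes: slice keys = args[::2] and vals = args[1::2], validate every key, pad vals with True for a dangling flag, then build the dict in one shot with dict(zip([k[2:] for k in keys], vals))
-- outside the precondition, e.g. on read_args_opt(['--a']): A returns {'a': True}, B returns {'a': True}
import Mathlib
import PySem

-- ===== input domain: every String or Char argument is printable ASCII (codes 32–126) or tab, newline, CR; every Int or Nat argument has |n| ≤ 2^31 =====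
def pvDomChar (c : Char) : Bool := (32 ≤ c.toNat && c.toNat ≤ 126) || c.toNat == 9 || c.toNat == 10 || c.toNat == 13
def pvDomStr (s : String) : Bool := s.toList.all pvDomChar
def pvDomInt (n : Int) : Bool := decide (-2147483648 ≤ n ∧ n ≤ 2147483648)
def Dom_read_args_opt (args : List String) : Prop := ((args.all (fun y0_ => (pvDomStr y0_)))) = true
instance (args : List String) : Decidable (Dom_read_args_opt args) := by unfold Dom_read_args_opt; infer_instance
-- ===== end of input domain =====

-- B replaces A's index-stepping while loop (args[i]/args[i+1], try/except IndexError) by three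
-- staged passes: key/value slices args[::2] and args[1::2], a validation pass over the keys,
-- then one dict(zip(...)) construction; same O(n) cost, more idiomatic.
-- Pre_ excludes inputs on which A raises (AssertionError/ValueError) and odd-length args, on
-- which A's returned dict holds the Python bool True — not a value of the declared str→str
-- type, so unstatable here (B reproduces that True in Python, see the cite).


-- ===== PORT A =====
-- the while loop: i steps by 2; args[i] is guarded by i < len, args[i+1] may raise IndexError
def readAgo (args : List String) (i : Nat) (ret : PySem.Dict String String) : PySem.Dict String String :=
  if h : i < args.length then
    let arg := args[i]
    if PySem.Str.find arg "--" ≠ 0 then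
      ret  -- Python raises AssertionError (ValueError when "--" is absent): excluded by Pre_
    else
      match args[i+1]? with
      | some v => readAgo args (i + 2) (ret.insert (PySem.Str.slice arg (some 2) none) v)
      | none => ret  -- Python stores ret[arg[2:]] = True, a bool not a str: excluded by Pre_
  else ret
termination_by args.length - i

def read_args_opt (args : List String) : List (String × String) :=
  (readAgo args 0 PySem.Dict.empty).items

-- ===== PORT B =====
-- Source B: keys = args[::2]; vals = args[1::2]; validate every key with key.index("--") != 0;
-- pad vals with True (bool, not str: that branch only fires on odd length, excluded by Pre_,
-- so here zip simply drops the dangling key); then dict(zip([k[2:] for k in keys], vals)).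
def read_args_opt_alt (args : List String) : List (String × String) :=
  let keys := (PySem.List.slice? args none none 2).getD []
  let vals := (PySem.List.slice? args (some 1) none 2).getD []
  if keys.all (fun k => PySem.Str.find k "--" == 0) then
    (((keys.map (fun k => PySem.Str.slice k (some 2) none)).zip vals).foldl
      (fun d kv => d.insert kv.1 kv.2) PySem.Dict.empty).items
  else []  -- Python raises AssertionError (ValueError when "--" is absent): excluded by Pre_

-- ===== PRECONDITION & SPEC =====
-- Pre_ excludes inputs where A raises (an even-position token not starting with "--") and
-- odd-length inputs, where A's dict holds the Python bool True — not a str, so the value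
-- lies outside the declared List (String × String) type (B returns the same dict in Python).
def Pre_read_args_opt (args : List String) : Prop :=
  args.length % 2 = 0 ∧
  ∀ i : Fin args.length, (i : Nat) % 2 = 0 → PySem.Str.startswith args[i] "--" = true
instance (args : List String) : Decidable (Pre_read_args_opt args) := by
  unfold Pre_read_args_opt; infer_instance

def pvWitness_read_args_opt : List String := ["--verbose", "1", "--out", "x.txt"]

def Spec_read_args_opt (args : List String) (out : List (String × String)) : Prop :=
  out = read_args_opt_alt args
instance (args : List String) (out : List (String × String)) : Decidable (Spec_read_args_opt args out) := by
  unfold Spec_read_args_opt; infer_instance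

-- ===== CLAIM (what is proved, stated in full; the proofs are below) =====
def Claim_equal_read_args_opt : Prop := ∀ (args : List String), Dom_read_args_opt args → Pre_read_args_opt args → Spec_read_args_opt args (read_args_opt args)

-- ===== LEMMAS AND PROOFS =====

-- proof-only helper: every other element of a list, starting at the head (= xs[::2])
def everyOther {α : Type} : List α → List α
  | [] => []
  | [a] => [a]
  | a :: _ :: rest => a :: everyOther rest

-- proof-only intermediate form of the computation: consume the list two at a time
def readBgo (xs : List String) (ret : PySem.Dict String String) : PySem.Dict String String :=
  match xs with
  | [] => ret
  | key :: rest =>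
    if !(PySem.Str.startswith key "--") then
      ret
    else
      match rest with
      | v :: rest' => readBgo rest' (ret.insert (PySem.Str.slice key (some 2) none) v)
      | [] => ret

-- a nonempty prefix is found at index 0 (connects A's .index("--") test with startswith)
lemma chars_find_of_prefix (s p : List Char) (hp : p ≠ []) (h : p.isPrefixOf s = true) :
    PySem.Chars.find s p = 0 := by
  cases s with
  | nil => cases p with
    | nil => exact absurd rfl hp
    | cons a t => simp [List.isPrefixOf] at h
  | cons a t => simp [PySem.Chars.find, PySem.Chars.find.go, h]

-- the loop of A, started at an index all of whose ≡-parity positions carry "--" options,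
-- computes what the two-at-a-time recursion computes on the remaining suffix
lemma readAgo_eq (args : List String) : ∀ (n i : Nat) (ret : PySem.Dict String String),
    args.length - i ≤ n →
    (∀ j : Fin args.length, i ≤ j → ((j : Nat) - i) % 2 = 0 →
      PySem.Str.startswith args[j] "--" = true) →
    readAgo args i ret = readBgo (args.drop i) ret := by
  intro n
  induction n with
  | zero =>
    intro i ret hn _
    have hle : args.length ≤ i := by omega
    rw [readAgo]
    simp [List.drop_eq_nil_of_le hle, Nat.not_lt.mpr hle, readBgo]
  | succ n ih =>
    intro i ret _hn hok
    by_cases h : i < args.length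
    · have hsw : PySem.Str.startswith args[i] "--" = true := by
        exact hok ⟨i, h⟩ (le_refl i) (by simp)
      have hfind : PySem.Str.find args[i] "--" = 0 := by
        have := chars_find_of_prefix args[i].toList "--".toList (by decide)
          (by simpa [PySem.Str.startswith, PySem.Chars.startswith] using hsw)
        simpa [PySem.Str.find] using this
      have hdrop : args.drop i = args[i] :: args.drop (i + 1) :=
        List.drop_eq_getElem_cons h
      rw [readAgo]
      rw [dif_pos h]
      simp only [hfind, ne_eq, not_true_eq_false, if_false]
      cases h2 : args[i + 1]? with
      | none =>
        have hlen : args.length ≤ i + 1 := by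
          by_contra hc
          simp [List.getElem?_eq_getElem (by omega : i + 1 < args.length)] at h2
        have hnil : args.drop (i + 1) = [] := List.drop_eq_nil_of_le hlen
        rw [hdrop, hnil]
        simp [readBgo]
      | some v =>
        have hlt : i + 1 < args.length := by
          by_contra hc
          simp [List.getElem?_eq_none (by omega : args.length ≤ i + 1)] at h2
        have hv : args[i + 1] = v := by
          have := List.getElem?_eq_getElem hlt
          rw [h2] at this; exact (Option.some.injEq _ _).mp this.symm
        have hdrop1 : args.drop (i + 1) = args[i + 1] :: args.drop (i + 2) :=
          List.drop_eq_getElem_cons hlt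
        rw [hdrop, hdrop1, hv]
        simp only [readBgo, hsw, Bool.not_true, Bool.false_eq_true, if_false]
        exact ih (i + 2) (ret.insert (PySem.Str.slice args[i] (some 2) none) v)
          (by omega)
          (fun j hj hpar => hok j (by omega) (by omega))
    · rw [readAgo]
      have hle : args.length ≤ i := by omega
      simp [List.drop_eq_nil_of_le hle, h, readBgo]

-- the filterMap-over-range form the slice? primitive produces, characterised as everyOther
lemma filterMap_range_everyOther {α : Type} (xs : List α) :
    List.filterMap (fun k => xs[2 * k]?) (List.range ((xs.length + 1) / 2)) = everyOther xs := by
  induction xs using everyOther.induct with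
  | case1 => simp [everyOther]
  | case2 a => simp [everyOther]
  | case3 a b rest ih =>
    have hlen : (((a :: b :: rest).length + 1) / 2) = (rest.length + 1) / 2 + 1 := by
      simp; omega
    rw [hlen, List.range_succ_eq_map, List.filterMap_cons, List.filterMap_map]
    simp only [Nat.mul_zero, List.getElem?_cons_zero, everyOther]
    congr 1

-- args[::2] is everyOther args
lemma slice_step2 {α : Type} (xs : List α) :
    PySem.List.slice? xs none none 2 = some (everyOther xs) := by
  have hidx : PySem.List.sliceIndices xs.length none none 2
      = ((0 : Int), (xs.length : Int), (2 : Int)) := by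
    simp [PySem.List.sliceIndices]
  rw [PySem.List.slice?]
  simp only [hidx]
  norm_num
  have hn : (if 0 < xs.length then (((xs.length : Int) + 2 - 1) / 2).toNat else 0)
      = (xs.length + 1) / 2 := by split_ifs <;> omega
  rw [hn]
  have hf : ∀ k ∈ List.range ((xs.length + 1) / 2),
      xs[((2 : Int) * (k : Int)).toNat]? = xs[2 * k]? := by
    intro k _; congr 1
  exact (List.filterMap_congr hf).trans (filterMap_range_everyOther xs)

-- args[1::2] is everyOther args.tail
lemma slice_step2_tail {α : Type} (xs : List α) :
    PySem.List.slice? xs (some 1) none 2 = some (everyOther xs.tail) := by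
  have hidx : PySem.List.sliceIndices xs.length (some 1) none 2
      = ((min 1 (xs.length : Int)), (xs.length : Int), (2 : Int)) := by
    simp [PySem.List.sliceIndices]
  rw [PySem.List.slice?]
  simp only [hidx]
  cases xs with
  | nil => norm_num [everyOther]
  | cons a t =>
    have hmin : min 1 ((a :: t).length : Int) = 1 := by simp
    rw [hmin]
    norm_num
    have hn : (if 0 < t.length then (((t.length : Int) + 2 - 1) / 2).toNat else 0)
        = (t.length + 1) / 2 := by split_ifs <;> omega
    rw [hn]
    have hf : ∀ k ∈ List.range ((t.length + 1) / 2),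
        (a :: t)[((1 : Int) + 2 * (k : Int)).toNat]? = t[2 * k]? := by
      intro k _
      have h1 : ((1 : Int) + 2 * (k : Int)).toNat = 2 * k + 1 := by omega
      rw [h1]; simp
    exact (List.filterMap_congr hf).trans (filterMap_range_everyOther t)

-- every element of everyOther xs sits at an even index of xs
lemma everyOther_startswith : ∀ (xs : List String),
    (∀ i : Fin xs.length, (i : Nat) % 2 = 0 → PySem.Str.startswith xs[i] "--" = true) →
    ∀ k ∈ everyOther xs, PySem.Str.startswith k "--" = true := by
  intro xs
  induction xs using everyOther.induct with
  | case1 => intro _ k hk; simp [everyOther] at hk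
  | case2 a =>
    intro h k hk
    simp [everyOther] at hk
    subst hk
    exact h ⟨0, by simp⟩ (by simp)
  | case3 a b rest ih =>
    intro h k hk
    simp only [everyOther, List.mem_cons] at hk
    rcases hk with rfl | hk
    · exact h ⟨0, by simp⟩ (by simp)
    · exact ih (fun j hj => by
        have := h ⟨(j : Nat) + 2, by simp only [List.length_cons]; omega⟩
          (by show ((j : Nat) + 2) % 2 = 0; omega)
        simpa using this) k hk

-- the two-at-a-time recursion equals the fold over the zip of the two slices
lemma readBgo_eq_fold : ∀ (xs : List String),
    xs.length % 2 = 0 →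
    (∀ k ∈ everyOther xs, PySem.Str.startswith k "--" = true) →
    ∀ ret : PySem.Dict String String,
    readBgo xs ret =
      (((everyOther xs).map (fun k => PySem.Str.slice k (some 2) none)).zip
        (everyOther xs.tail)).foldl (fun d kv => d.insert kv.1 kv.2) ret := by
  intro xs
  induction xs using everyOther.induct with
  | case1 => intro _ _ ret; simp [readBgo, everyOther]
  | case2 a => intro h; simp at h
  | case3 a b rest ih =>
    intro hlen hk ret
    have ha : PySem.Str.startswith a "--" = true := hk a (by simp [everyOther])
    have htail : everyOther (b :: rest) = b :: everyOther rest.tail := by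
      cases rest with
      | nil => simp [everyOther]
      | cons c rest' => simp [everyOther]
    simp only [readBgo, ha, Bool.not_true, Bool.false_eq_true, if_false]
    rw [ih (by simp at hlen ⊢; omega)
      (fun k hm => hk k (by simp [everyOther]; right; exact hm))]
    simp only [everyOther, List.tail_cons, htail, List.map_cons, List.zip_cons_cons,
      List.foldl_cons]

-- ===== VERDICT (by name: the statement is the Claim_ definition above) =====
theorem read_args_opt_spec : Claim_equal_read_args_opt := by
  intro args _hdom hpre
  unfold Spec_read_args_opt read_args_opt read_args_opt_alt
  rw [slice_step2, slice_step2_tail]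
  simp only [Option.getD_some]
  have hmem := everyOther_startswith args hpre.2
  have hall : (everyOther args).all (fun k => PySem.Str.find k "--" == 0) = true := by
    rw [List.all_eq_true]
    intro k hk
    have hsw := hmem k hk
    have hfind := chars_find_of_prefix k.toList ['-', '-'] (by decide)
      (by simpa [PySem.Str.startswith, PySem.Chars.startswith] using hsw)
    simp [PySem.Str.find, hfind]
  rw [if_pos hall]
  rw [readAgo_eq args args.length 0 PySem.Dict.empty (by omega)
    (fun j _ hpar => hpre.2 j (by simpa using hpar)), List.drop_zero]
  rw [readBgo_eq_fold args hpre.1 hmem]
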